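-- pv_equiv track=rewrite | github.com/wongwill86/air-tasks | dags/synaptor/minnie65_p4.py | chunk_bboxes
-- ===== SOURCE A (Python) =====
-- import itertools
-- import operator
--
-- def chunk_bboxes(vol_size, chunk_size, offset=None, mip=0):
--
--     if mip > 0:
--         mip_factor = 2 ** mip
--         vol_size = (vol_size[0]//mip_factor,
--                     vol_size[1]//mip_factor,
--                     vol_size[2])
--
--         chunk_size = (chunk_size[0]//mip_factor,
--                       chunk_size[1]//mip_factor,
--                       chunk_size[2])
--
--         if offset is not None:
--             offset = (offset[0]//mip_factor,
--                       offset[1]//mip_factor,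
--                       offset[2])
--
--     x_bnds = bounds1D(vol_size[0], chunk_size[0])
--     y_bnds = bounds1D(vol_size[1], chunk_size[1])
--     z_bnds = bounds1D(vol_size[2], chunk_size[2])
--
--     bboxes = [tuple(zip(xs, ys, zs))
--               for (xs, ys, zs) in itertools.product(x_bnds, y_bnds, z_bnds)]
--
--     if offset is not None:
--         bboxes = [(tuple(map(operator.add, bb[0], offset)),
--                    tuple(map(operator.add, bb[1], offset)))
--                   for bb in bboxes]
--
--     return bboxes
--
-- def bounds1D(full_width, step_size):
--
--     assert step_size > 0, "invalid step_size: {}".format(step_size)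
--     assert full_width > 0, "invalid volume_width: {}".format(full_width)
--
--     start = 0
--     end = step_size
--
--     bounds = []
--     while end < full_width:
--         bounds.append((start, end))
--
--         start += step_size
--         end += step_size
--
--     # last window
--     bounds.append((start, end))
--
--     return bounds
-- ===== SOURCE B (Python) =====
-- def chunk_bboxes(vol_size, chunk_size, offset=None, mip=0):
--     if mip > 0:
--         f = 2 ** mip
--         vol_size = (vol_size[0] // f, vol_size[1] // f, vol_size[2])
--         chunk_size = (chunk_size[0] // f, chunk_size[1] // f, chunk_size[2])
--         if offset is not None:
--             offset = (offset[0] // f, offset[1] // f, offset[2])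
--
--     counts = []
--     for full_width, step in zip(vol_size, chunk_size):
--         assert step > 0, "invalid step_size: {}".format(step)
--         assert full_width > 0, "invalid volume_width: {}".format(full_width)
--         counts.append((full_width + step - 1) // step)  # ceil division
--     nx, ny, nz = counts
--
--     ox, oy, oz = offset if offset is not None else (0, 0, 0)
--     sx, sy, sz = chunk_size
--     return [((i * sx + ox, j * sy + oy, k * sz + oz),
--              ((i + 1) * sx + ox, (j + 1) * sy + oy, (k + 1) * sz + oz))
--             for i in range(nx) for j in range(ny) for k in range(nz)]
-- ===== Notes on version B (the rewrite author's own statement) =====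
-- stated objective: alternative
-- what changed: Replaces the per-axis accumulating while-loop (bounds1D) plus itertools.product plus a second offset-remapping pass by a closed-form ceil-division chunk count per axis and a single triple comprehension that computes each corner directly as k*step+offset.
import Mathlib
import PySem

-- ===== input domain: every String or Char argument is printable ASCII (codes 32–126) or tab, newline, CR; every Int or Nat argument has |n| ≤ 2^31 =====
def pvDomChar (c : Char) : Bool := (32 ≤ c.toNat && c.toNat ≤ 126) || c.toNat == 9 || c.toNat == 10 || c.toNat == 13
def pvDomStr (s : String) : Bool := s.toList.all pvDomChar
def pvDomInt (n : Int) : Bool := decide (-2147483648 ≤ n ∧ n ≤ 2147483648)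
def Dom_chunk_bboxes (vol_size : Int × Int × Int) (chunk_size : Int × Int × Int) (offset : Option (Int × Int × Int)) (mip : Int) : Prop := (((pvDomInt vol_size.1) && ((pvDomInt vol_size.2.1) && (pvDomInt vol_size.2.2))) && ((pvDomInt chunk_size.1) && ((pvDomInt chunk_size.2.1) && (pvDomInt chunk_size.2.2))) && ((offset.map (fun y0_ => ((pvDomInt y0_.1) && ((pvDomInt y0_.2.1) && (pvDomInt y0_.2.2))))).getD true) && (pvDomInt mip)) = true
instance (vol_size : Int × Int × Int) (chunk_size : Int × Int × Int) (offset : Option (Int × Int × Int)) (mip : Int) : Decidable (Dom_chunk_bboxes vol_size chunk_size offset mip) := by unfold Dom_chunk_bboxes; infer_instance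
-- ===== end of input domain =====

-- ===== PORT A =====
-- B replaces bounds1D's while-loop and the two-pass product+offset remap by closed-form
-- per-axis ceil-division counts and one direct triple loop (objective: alternative).

-- while end < full_width: append (start,end); step += — plus the final window.
-- The 'step ≤ 0' branch only makes the recursion total; Python asserts step > 0 first (excluded by Pre_).
def bounds1DLoop (full_width step start stop : Int) : List (Int × Int) :=
  if _h : step ≤ 0 then [(start, stop)]
  else if _h2 : stop < full_width then
    (start, stop) :: bounds1DLoop full_width step (start + step) (stop + step)
  else [(start, stop)]
termination_by (full_width - stop).toNat
decreasing_by omega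

def bounds1D (full_width step_size : Int) : List (Int × Int) :=
  bounds1DLoop full_width step_size 0 step_size

def chunk_bboxes (vol_size : Int × Int × Int) (chunk_size : Int × Int × Int) (offset : Option (Int × Int × Int)) (mip : Int) : List ((Int × Int × Int) × (Int × Int × Int)) :=
  let mf : Int := 2 ^ mip.toNat
  let vs := if mip > 0 then (PySem.Int.floordiv vol_size.1 mf, PySem.Int.floordiv vol_size.2.1 mf, vol_size.2.2) else vol_size
  let cs := if mip > 0 then (PySem.Int.floordiv chunk_size.1 mf, PySem.Int.floordiv chunk_size.2.1 mf, chunk_size.2.2) else chunk_size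
  let off := if mip > 0 then offset.map (fun o => (PySem.Int.floordiv o.1 mf, PySem.Int.floordiv o.2.1 mf, o.2.2)) else offset
  let x_bnds := bounds1D vs.1 cs.1
  let y_bnds := bounds1D vs.2.1 cs.2.1
  let z_bnds := bounds1D vs.2.2 cs.2.2
  let bboxes := x_bnds.flatMap (fun xs => y_bnds.flatMap (fun ys => z_bnds.map (fun zs =>
      ((xs.1, ys.1, zs.1), (xs.2, ys.2, zs.2)))))
  match off with
  | none => bboxes
  | some o => bboxes.map (fun bb =>
      ((bb.1.1 + o.1, bb.1.2.1 + o.2.1, bb.1.2.2 + o.2.2),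
       (bb.2.1 + o.1, bb.2.2.1 + o.2.1, bb.2.2.2 + o.2.2)))

-- ===== PORT B =====
-- (full_width + step - 1) // step
def ceilCount (full_width step : Int) : Int := PySem.Int.floordiv (full_width + step - 1) step

def chunk_bboxes_alt (vol_size : Int × Int × Int) (chunk_size : Int × Int × Int) (offset : Option (Int × Int × Int)) (mip : Int) : List ((Int × Int × Int) × (Int × Int × Int)) :=
  let mf : Int := 2 ^ mip.toNat
  let vs := if mip > 0 then (PySem.Int.floordiv vol_size.1 mf, PySem.Int.floordiv vol_size.2.1 mf, vol_size.2.2) else vol_size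
  let cs := if mip > 0 then (PySem.Int.floordiv chunk_size.1 mf, PySem.Int.floordiv chunk_size.2.1 mf, chunk_size.2.2) else chunk_size
  let off := if mip > 0 then offset.map (fun o => (PySem.Int.floordiv o.1 mf, PySem.Int.floordiv o.2.1 mf, o.2.2)) else offset
  let nx := ceilCount vs.1 cs.1
  let ny := ceilCount vs.2.1 cs.2.1
  let nz := ceilCount vs.2.2 cs.2.2
  let o := off.getD (0, 0, 0)
  (PySem.List.pyRange 0 nx 1).flatMap (fun i =>
    (PySem.List.pyRange 0 ny 1).flatMap (fun j =>
      (PySem.List.pyRange 0 nz 1).map (fun k =>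
        ((i * cs.1 + o.1, j * cs.2.1 + o.2.1, k * cs.2.2 + o.2.2),
         ((i + 1) * cs.1 + o.1, (j + 1) * cs.2.1 + o.2.1, (k + 1) * cs.2.2 + o.2.2)))))

-- ===== PRECONDITION & SPEC =====
-- Pre_ excludes exactly the inputs where a bounds1D assertion fails in Python A
-- (a non-positive chunk or volume width after the mip adjustment): A raises AssertionError there.
def Pre_chunk_bboxes (vol_size : Int × Int × Int) (chunk_size : Int × Int × Int) (offset : Option (Int × Int × Int)) (mip : Int) : Prop :=
  let mf : Int := 2 ^ mip.toNat
  let vs := if mip > 0 then (PySem.Int.floordiv vol_size.1 mf, PySem.Int.floordiv vol_size.2.1 mf, vol_size.2.2) else vol_size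
  let cs := if mip > 0 then (PySem.Int.floordiv chunk_size.1 mf, PySem.Int.floordiv chunk_size.2.1 mf, chunk_size.2.2) else chunk_size
  0 < cs.1 ∧ 0 < vs.1 ∧ 0 < cs.2.1 ∧ 0 < vs.2.1 ∧ 0 < cs.2.2 ∧ 0 < vs.2.2
instance (vol_size : Int × Int × Int) (chunk_size : Int × Int × Int) (offset : Option (Int × Int × Int)) (mip : Int) : Decidable (Pre_chunk_bboxes vol_size chunk_size offset mip) := by unfold Pre_chunk_bboxes; infer_instance

def pvWitness_chunk_bboxes : (Int × Int × Int) × (Int × Int × Int) × (Option (Int × Int × Int)) × Int :=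
  ((10, 7, 3), (4, 3, 2), some (1, 2, 3), 0)

def Spec_chunk_bboxes (vol_size : Int × Int × Int) (chunk_size : Int × Int × Int) (offset : Option (Int × Int × Int)) (mip : Int) (out : List ((Int × Int × Int) × (Int × Int × Int))) : Prop := out = chunk_bboxes_alt vol_size chunk_size offset mip
instance (vol_size : Int × Int × Int) (chunk_size : Int × Int × Int) (offset : Option (Int × Int × Int)) (mip : Int) (out : List ((Int × Int × Int) × (Int × Int × Int))) : Decidable (Spec_chunk_bboxes vol_size chunk_size offset mip out) := by unfold Spec_chunk_bboxes; infer_instance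

-- ===== CLAIM (what is proved, stated in full; the proofs are below) =====
def Claim_equal_chunk_bboxes : Prop := ∀ (vol_size : Int × Int × Int) (chunk_size : Int × Int × Int) (offset : Option (Int × Int × Int)) (mip : Int), Dom_chunk_bboxes vol_size chunk_size offset mip → Pre_chunk_bboxes vol_size chunk_size offset mip → Spec_chunk_bboxes vol_size chunk_size offset mip (chunk_bboxes vol_size chunk_size offset mip)

-- ===== LEMMAS AND PROOFS =====

-- the loop from window index i equals a map over the remaining window indices
theorem bounds1DLoop_eq (fw step : Int) (hs : 0 < step) (n : Int) (hn : n = ceilCount fw step)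
    (i : Int) (hlt : i < n) :
    bounds1DLoop fw step (i * step) ((i + 1) * step) =
      (PySem.List.pyRange i n 1).map (fun k => (k * step, (k + 1) * step)) := by
  have hn' : PySem.Int.floordiv (fw + step - 1) step = n := hn.symm
  have hbr := (PySem.Int.floordiv_eq_iff_of_pos hs).mp hn'
  rw [bounds1DLoop, dif_neg (by omega : ¬ step ≤ 0)]
  by_cases hcase : i + 1 < n
  · have hend : (i + 1) * step < fw := by
      nlinarith [mul_le_mul_of_nonneg_right (show i + 1 ≤ n - 1 by omega) hs.le, hbr.1]
    rw [dif_pos hend]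
    rw [PySem.List.pyRange_one_cons hlt, List.map_cons]
    have e1 : i * step + step = (i + 1) * step := by ring
    have e2 : (i + 1) * step + step = (i + 1 + 1) * step := by ring
    rw [e1, e2, bounds1DLoop_eq fw step hs n hn (i + 1) hcase]
  · have hfle : fw ≤ n * step := by nlinarith [hbr.2]
    have hend : ¬ (i + 1) * step < fw := by
      have : (i + 1) * step = n * step := by rw [show i + 1 = n by omega]
      omega
    rw [dif_neg hend, PySem.List.pyRange_one_cons hlt, List.map_cons,
        PySem.List.pyRange_one_eq_nil (by omega : (n:Int) ≤ i + 1), List.map_nil]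
termination_by (n - i).toNat
decreasing_by omega

theorem bounds1D_eq (fw step : Int) (hs : 0 < step) (hfw : 0 < fw) :
    bounds1D fw step =
      (PySem.List.pyRange 0 (ceilCount fw step) 1).map (fun k => (k * step, (k + 1) * step)) := by
  have hpos : 0 < ceilCount fw step := by
    have := (PySem.Int.le_floordiv_iff_mul_le (a := fw + step - 1) (b := step) (q := 1) hs).mpr
      (by omega)
    exact lt_of_lt_of_le zero_lt_one this
  have := bounds1DLoop_eq fw step hs (ceilCount fw step) rfl 0 hpos
  simpa [bounds1D] using this

-- the product of the three per-axis window lists, offset added, equals B's direct triple loop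
theorem core_eq (vx cx vy cy vz cz : Int) (o : Int × Int × Int)
    (hcx : 0 < cx) (hvx : 0 < vx) (hcy : 0 < cy) (hvy : 0 < vy) (hcz : 0 < cz) (hvz : 0 < vz) :
    (((bounds1D vx cx).flatMap (fun xs => (bounds1D vy cy).flatMap (fun ys =>
        (bounds1D vz cz).map (fun zs => ((xs.1, ys.1, zs.1), (xs.2, ys.2, zs.2)))))).map
      (fun bb => ((bb.1.1 + o.1, bb.1.2.1 + o.2.1, bb.1.2.2 + o.2.2),
                  (bb.2.1 + o.1, bb.2.2.1 + o.2.1, bb.2.2.2 + o.2.2)))) =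
    (PySem.List.pyRange 0 (ceilCount vx cx) 1).flatMap (fun i =>
      (PySem.List.pyRange 0 (ceilCount vy cy) 1).flatMap (fun j =>
        (PySem.List.pyRange 0 (ceilCount vz cz) 1).map (fun k =>
          ((i * cx + o.1, j * cy + o.2.1, k * cz + o.2.2),
           ((i + 1) * cx + o.1, (j + 1) * cy + o.2.1, (k + 1) * cz + o.2.2))))) := by
  rw [bounds1D_eq vx cx hcx hvx, bounds1D_eq vy cy hcy hvy, bounds1D_eq vz cz hcz hvz]
  rw [List.map_flatMap, List.flatMap_map]
  congr 1
  funext i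
  rw [List.map_flatMap, List.flatMap_map]
  congr 1
  funext j
  rw [List.map_map, List.map_map]
  rfl

-- ===== VERDICT (by name: the statement is the Claim_ definition above) =====
theorem chunk_bboxes_spec : Claim_equal_chunk_bboxes := by
  intro vol_size chunk_size offset mip _ hpre
  unfold Spec_chunk_bboxes chunk_bboxes chunk_bboxes_alt
  unfold Pre_chunk_bboxes at hpre
  simp only at hpre ⊢
  obtain ⟨hcx, hvx, hcy, hvy, hcz, hvz⟩ := hpre
  set mf : Int := 2 ^ mip.toNat with hmf
  set vs := if mip > 0 then (PySem.Int.floordiv vol_size.1 mf, PySem.Int.floordiv vol_size.2.1 mf, vol_size.2.2) else vol_size with hvs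
  set cs := if mip > 0 then (PySem.Int.floordiv chunk_size.1 mf, PySem.Int.floordiv chunk_size.2.1 mf, chunk_size.2.2) else chunk_size with hcs
  set off := if mip > 0 then offset.map (fun o => (PySem.Int.floordiv o.1 mf, PySem.Int.floordiv o.2.1 mf, o.2.2)) else offset with hoff
  cases off with
  | none =>
      have h := core_eq vs.1 cs.1 vs.2.1 cs.2.1 vs.2.2 cs.2.2 ((0 : Int), (0 : Int), (0 : Int))
        hcx hvx hcy hvy hcz hvz
      simp only [add_zero] at h
      simpa using h
  | some o =>
      exact core_eq vs.1 cs.1 vs.2.1 cs.2.1 vs.2.2 cs.2.2 o hcx hvx hcy hvy hcz hvz
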